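-- pv_equiv track=rewrite | github.com/gmackie/control-panel | enterprise-integration/api-gateway.py | _path_matches
-- ===== SOURCE A (Python) =====
-- def _path_matches(request_path: str, endpoint_path: str) -> bool:
--     # Simple path matching - in production, use more sophisticated routing
--     if endpoint_path == request_path:
--         return True
--
--     # Handle path parameters like /users/{id}
--     endpoint_parts = endpoint_path.split('/')
--     request_parts = request_path.split('/')
--
--     if len(endpoint_parts) != len(request_parts):
--         return False
--
--     for endpoint_part, request_part in zip(endpoint_parts, request_parts):
--         if endpoint_part.startswith('{') and endpoint_part.endswith('}'):
--             # Path parameter, matches anything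
--             continue
--         elif endpoint_part != request_part:
--             return False
--
--     return True
-- ===== SOURCE B (Python) =====
-- def _path_matches(request_path: str, endpoint_path: str) -> bool:
--     # Streaming two-pointer scan: walk both paths segment by segment in one pass,
--     # never materialising the split lists.
--     i = j = 0
--     while True:
--         i2 = request_path.find('/', i)
--         j2 = endpoint_path.find('/', j)
--         rseg = request_path[i:] if i2 < 0 else request_path[i:i2]
--         eseg = endpoint_path[j:] if j2 < 0 else endpoint_path[j:j2]
--         if not (eseg.startswith('{') and eseg.endswith('}')) and eseg != rseg:
--             return False
--         if i2 < 0 or j2 < 0: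
--             return i2 < 0 and j2 < 0
--         i, j = i2 + 1, j2 + 1
-- ===== Notes on version B (the rewrite author's own statement) =====
-- stated objective: alternative
-- what changed: Replaces the split-both-paths-then-compare-lengths-then-zip-loop (plus the exact-equality shortcut) with a single streaming two-pointer scan that extracts and compares one segment pair at a time via str.find, never building the split lists.
import Mathlib
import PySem

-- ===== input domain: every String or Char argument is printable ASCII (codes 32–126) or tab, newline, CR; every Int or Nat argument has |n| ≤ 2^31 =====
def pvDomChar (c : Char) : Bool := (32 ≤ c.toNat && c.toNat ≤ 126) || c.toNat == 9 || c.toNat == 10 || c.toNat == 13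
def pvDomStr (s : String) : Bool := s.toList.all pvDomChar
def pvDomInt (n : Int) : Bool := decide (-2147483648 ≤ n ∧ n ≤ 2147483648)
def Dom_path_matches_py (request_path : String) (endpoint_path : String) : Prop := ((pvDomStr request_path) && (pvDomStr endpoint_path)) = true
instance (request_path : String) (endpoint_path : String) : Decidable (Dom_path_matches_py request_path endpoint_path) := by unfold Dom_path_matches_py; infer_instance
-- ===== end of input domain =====

-- B replaces A's split-then-length-check-then-zip-loop with a streaming per-segment scan (alternative decomposition, same cost).

-- ===== PORT A =====
-- the `for … in zip(…)` loop with its early `return False`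
def pvLoopA : List (List Char × List Char) → Bool
  | [] => true
  | (ep, rp) :: rest =>
      if PySem.Chars.startswith ep ['{'] && PySem.Chars.endswith ep ['}'] then pvLoopA rest
      else if ep ≠ rp then false
      else pvLoopA rest

def path_matches_py (request_path : String) (endpoint_path : String) : Bool :=
  if endpoint_path == request_path then true
  else
    let endpoint_parts := PySem.Chars.splitOn endpoint_path.toList ['/']
    let request_parts := PySem.Chars.splitOn request_path.toList ['/']
    if endpoint_parts.length ≠ request_parts.length then false
    else pvLoopA (endpoint_parts.zip request_parts)

-- ===== PORT B =====
-- first segment (up to the next '/') and, if a '/' was found, the remainder after it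
def pvSplitSeg : List Char → List Char × Option (List Char)
  | [] => ([], none)
  | c :: cs => if c = '/' then ([], some cs)
               else let p := pvSplitSeg cs; (c :: p.1, p.2)

theorem pvSplitSeg_rest_lt : ∀ (l r : List Char), (pvSplitSeg l).2 = some r → r.length < l.length := by
  intro l
  induction l with
  | nil => intro r h; simp [pvSplitSeg] at h
  | cons c cs ih =>
      intro r h
      by_cases hc : c = '/'
      · simp [pvSplitSeg, hc] at h; subst h; simp
      · simp [pvSplitSeg, hc] at h
        exact Nat.lt_trans (ih r h) (by simp)

def pvSegOk (eseg rseg : List Char) : Bool :=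
  (PySem.Chars.startswith eseg ['{'] && PySem.Chars.endswith eseg ['}']) || eseg == rseg

def pvMatchSegs (r e : List Char) : Bool :=
  match hr : (pvSplitSeg r).2, he : (pvSplitSeg e).2 with
  | none, none => pvSegOk (pvSplitSeg e).1 (pvSplitSeg r).1
  | some r', some e' => pvSegOk (pvSplitSeg e).1 (pvSplitSeg r).1 && pvMatchSegs r' e'
  | _, _ => false
termination_by r.length
decreasing_by exact pvSplitSeg_rest_lt r r' hr

def path_matches_py_alt (request_path : String) (endpoint_path : String) : Bool :=
  pvMatchSegs request_path.toList endpoint_path.toList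

-- ===== PRECONDITION & SPEC =====
def Spec_path_matches_py (request_path : String) (endpoint_path : String) (out : Bool) : Prop := out = path_matches_py_alt request_path endpoint_path
instance (request_path : String) (endpoint_path : String) (out : Bool) : Decidable (Spec_path_matches_py request_path endpoint_path out) := by unfold Spec_path_matches_py; infer_instance

-- ===== CLAIM (what is proved, stated in full; the proofs are below) =====
def Claim_equal_path_matches_py : Prop := ∀ (request_path : String) (endpoint_path : String), Dom_path_matches_py request_path endpoint_path → Spec_path_matches_py request_path endpoint_path (path_matches_py request_path endpoint_path)

-- ===== LEMMAS AND PROOFS =====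

-- structural reformulation of Chars.splitOn on the single-char separator '/'
def pvMySplit (l : List Char) : List (List Char) :=
  match h : (pvSplitSeg l).2 with
  | none => [(pvSplitSeg l).1]
  | some rest => (pvSplitSeg l).1 :: pvMySplit rest
termination_by l.length
decreasing_by exact pvSplitSeg_rest_lt l rest h

theorem pvSplitSeg_slash (cs : List Char) : pvSplitSeg ('/' :: cs) = ([], some cs) := by
  simp [pvSplitSeg]

theorem pvSplitSeg_cons {c : Char} (hc : c ≠ '/') (cs : List Char) :
    pvSplitSeg (c :: cs) = (c :: (pvSplitSeg cs).1, (pvSplitSeg cs).2) := by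
  simp [pvSplitSeg, hc]

theorem pvMySplit_none {l : List Char} (h : (pvSplitSeg l).2 = none) :
    pvMySplit l = [(pvSplitSeg l).1] := by
  rw [pvMySplit]; split <;> simp_all

theorem pvMySplit_some {l rest : List Char} (h : (pvSplitSeg l).2 = some rest) :
    pvMySplit l = (pvSplitSeg l).1 :: pvMySplit rest := by
  rw [pvMySplit]; split <;> simp_all

theorem pvMySplit_ne_nil (l : List Char) : pvMySplit l ≠ [] := by
  rcases h : (pvSplitSeg l).2 with _ | rest
  · rw [pvMySplit_none h]; simp
  · rw [pvMySplit_some h]; simp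

theorem pvSplitOn_go_eq (fuel : Nat) : ∀ (l cur : List Char) (acc : List (List Char)),
    l.length ≤ fuel →
    PySem.Chars.splitOn.go ['/'] fuel l cur acc
      = acc.reverse ++ (pvMySplit l).modifyHead (cur.reverse ++ ·) := by
  induction fuel with
  | zero =>
      intro l cur acc h
      have : l = [] := List.eq_nil_of_length_eq_zero (Nat.le_zero.mp h)
      subst this
      rw [pvMySplit_none (by simp [pvSplitSeg])]
      simp [PySem.Chars.splitOn.go, pvSplitSeg]
  | succ f ih =>
      intro l cur acc h
      cases l with
      | nil =>
          rw [pvMySplit_none (by simp [pvSplitSeg])]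
          simp [PySem.Chars.splitOn.go, pvSplitSeg]
      | cons c cs =>
          by_cases hc : c = '/'
          · subst hc
            have hpre : List.isPrefixOf ['/'] ('/' :: cs) = true := by
              simp [List.isPrefixOf]
            rw [PySem.Chars.splitOn.go]
            simp only [hpre, if_pos]
            have hdrop : List.drop (List.length ['/']) ('/' :: cs) = cs := by simp
            rw [hdrop, ih cs [] ((cur.reverse :: acc)) (by simpa using Nat.le_of_succ_le_succ h)]
            rw [pvMySplit_some (l := '/' :: cs) (rest := cs) (by rw [pvSplitSeg_slash])]
            rw [pvSplitSeg_slash]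
            rcases hm : pvMySplit cs with _ | ⟨x, xs⟩
            · exact absurd hm (pvMySplit_ne_nil cs)
            · simp
          · have hpre : List.isPrefixOf ['/'] (c :: cs) = false := by
              simp [List.isPrefixOf]
              intro h'; exact absurd h'.symm hc
            rw [PySem.Chars.splitOn.go]
            rw [if_neg (by simp [hpre])]
            rw [ih cs (c :: cur) acc (by simpa using Nat.le_of_succ_le_succ h)]
            rcases h2 : (pvSplitSeg cs).2 with _ | rest
            · rw [pvMySplit_none h2,
                  pvMySplit_none (l := c :: cs) (by rw [pvSplitSeg_cons hc]; exact h2),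
                  pvSplitSeg_cons hc]
              simp
            · rw [pvMySplit_some h2,
                  pvMySplit_some (l := c :: cs) (rest := rest) (by rw [pvSplitSeg_cons hc]; exact h2),
                  pvSplitSeg_cons hc]
              simp

theorem pvSplitOn_eq (l : List Char) : PySem.Chars.splitOn l ['/'] = pvMySplit l := by
  have h := pvSplitOn_go_eq (l.length + 1) l [] [] (Nat.le_succ _)
  have h2 : List.modifyHead (fun x => [].reverse ++ x) (pvMySplit l) = pvMySplit l := by
    cases pvMySplit l <;> simp
  rw [PySem.Chars.splitOn, h, h2]
  simp

-- A's length-check + zip-loop over the split lists, as one function of the two lists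
def pvCompare (ep rp : List (List Char)) : Bool :=
  if ep.length ≠ rp.length then false else pvLoopA (ep.zip rp)

theorem pvLoopA_cons (e r : List Char) (rest : List (List Char × List Char)) :
    pvLoopA ((e, r) :: rest) = (pvSegOk e r && pvLoopA rest) := by
  rw [pvLoopA, pvSegOk]
  by_cases hp : (PySem.Chars.startswith e ['{'] && PySem.Chars.endswith e ['}']) = true
  · simp [hp]
  · simp [hp]
    by_cases he : e = r <;> simp [he]

theorem pvMatchSegs_none {r e : List Char} (hr : (pvSplitSeg r).2 = none)
    (he : (pvSplitSeg e).2 = none) :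
    pvMatchSegs r e = pvSegOk (pvSplitSeg e).1 (pvSplitSeg r).1 := by
  rw [pvMatchSegs]; split <;> simp_all

theorem pvMatchSegs_some {r e r' e' : List Char} (hr : (pvSplitSeg r).2 = some r')
    (he : (pvSplitSeg e).2 = some e') :
    pvMatchSegs r e = (pvSegOk (pvSplitSeg e).1 (pvSplitSeg r).1 && pvMatchSegs r' e') := by
  rw [pvMatchSegs]; split <;> simp_all

theorem pvMatchSegs_mix₁ {r e e' : List Char} (hr : (pvSplitSeg r).2 = none)
    (he : (pvSplitSeg e).2 = some e') : pvMatchSegs r e = false := by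
  rw [pvMatchSegs]; split <;> simp_all

theorem pvMatchSegs_mix₂ {r e r' : List Char} (hr : (pvSplitSeg r).2 = some r')
    (he : (pvSplitSeg e).2 = none) : pvMatchSegs r e = false := by
  rw [pvMatchSegs]; split <;> simp_all

theorem pvMatchSegs_eq_compare (r : List Char) : ∀ (e : List Char),
    pvMatchSegs r e = pvCompare (pvMySplit e) (pvMySplit r) := by
  induction r using pvMySplit.induct with
  | case1 r hr =>
      intro e
      rcases he : (pvSplitSeg e).2 with _ | e'
      · rw [pvMatchSegs_none hr he, pvMySplit_none hr, pvMySplit_none he]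
        simp [pvCompare, pvLoopA_cons, pvLoopA]
      · rw [pvMatchSegs_mix₁ hr he, pvMySplit_none hr, pvMySplit_some he]
        have hne : ((pvSplitSeg e).1 :: pvMySplit e').length ≠ ([(pvSplitSeg r).1] : List (List Char)).length := by
          have := pvMySplit_ne_nil e'
          cases hm : pvMySplit e' <;> simp_all
        rw [pvCompare, if_pos hne]
  | case2 r r' hr ih =>
      intro e
      rcases he : (pvSplitSeg e).2 with _ | e'
      · rw [pvMatchSegs_mix₂ hr he, pvMySplit_some hr, pvMySplit_none he]
        have hne : ([(pvSplitSeg e).1] : List (List Char)).length ≠ ((pvSplitSeg r).1 :: pvMySplit r').length := by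
          have := pvMySplit_ne_nil r'
          cases hm : pvMySplit r' <;> simp_all
        rw [pvCompare, if_pos hne]
      · rw [pvMatchSegs_some hr he, pvMySplit_some hr, pvMySplit_some he, ih e']
        simp only [pvCompare, List.length_cons, List.zip_cons_cons, pvLoopA_cons]
        by_cases hl : (pvMySplit e').length = (pvMySplit r').length
        · simp [hl]
        · simp [hl]

theorem pvMatchSegs_refl (l : List Char) : pvMatchSegs l l = true := by
  induction l using pvMySplit.induct with
  | case1 l h =>
      rw [pvMatchSegs_none h h]; simp [pvSegOk]
  | case2 l rest h ih =>
      rw [pvMatchSegs_some h h]; simp [pvSegOk, ih]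

-- ===== VERDICT (by name: the statement is the Claim_ definition above) =====
theorem path_matches_py_spec : Claim_equal_path_matches_py := by
  intro r e _
  unfold Spec_path_matches_py path_matches_py path_matches_py_alt
  by_cases heq : e = r
  · subst heq
    simp [pvMatchSegs_refl]
  · have hne : (e == r) = false := by simp [heq]
    simp only [hne, Bool.false_eq_true, if_false]
    rw [pvSplitOn_eq, pvSplitOn_eq, pvMatchSegs_eq_compare]
    rfl
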